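-- pv_equiv track=rewrite | github.com/artemponomarevjetski/python-codility-solutions | overlappng-circles.py | solution
-- ===== SOURCE A (Python) =====
-- def solution(A):
--     # write your code in Python 3.6
--     """
--     Task description is given on Codility website, https://app.codility.com/programmers/
--     number of pairs of overlapping circles
--     """
--     N = len(A)
--     if N == 0:
--         return 0
--     if not (N >= 0 and N <= 1e5):
--         return 0
--     if not (min(A) >= 0 and max(A) <= 2147483647):
--         return 0
--     for a in A:
--         if a < 0:
--             return 0
--
--     B = [[i-A[i], 1] for i in range(N)]
--     C = [[i+A[i],-1] for i in range(N)]
--     D = B+C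
--     E = sorted(D, key=lambda x: x[0])
--     sum1 = sum2 = 0
--     for i in range(len(E)):
--         temp = E[i][1]
--         sum1 += temp
--         if temp == 1:
--             sum2 += sum1-1
--             if sum2 > 1e7:
--                 return -1
--     return sum2
-- ===== SOURCE B (Python) =====
-- def solution(A):
--     # Two-array sweep: sort starts and ends separately and walk them with an
--     # end-pointer and an open-circle counter (no merged tagged event list).
--     N = len(A)
--     if N == 0:
--         return 0
--     if not (N >= 0 and N <= 1e5):
--         return 0
--     if not (min(A) >= 0 and max(A) <= 2147483647):
--         return 0
--     for a in A:
--         if a < 0: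
--             return 0
--
--     starts = sorted(i - A[i] for i in range(N))
--     ends = sorted(i + A[i] for i in range(N))
--     j = 0          # ends[0:j] are the circles already closed
--     opened = 0     # circles started and not yet closed
--     total = 0
--     for s in starts:
--         while j < N and ends[j] < s:   # strict: touching circles overlap
--             opened -= 1
--             j += 1
--         total += opened
--         opened += 1
--         if total > 1e7:
--             return -1
--     return total
-- ===== Notes on version B (the rewrite author's own statement) =====
-- stated objective: alternative
-- what changed: Replaces A's single merged list of +1/-1 tagged events (built, stably sorted by coordinate, then swept with a running signed counter) by two independently sorted plain-int arrays of starts and ends walked with an end-pointer and an open-circle counter; strict '<' at the pointer reproduces the stable sort's start-before-end tie rule.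
import Mathlib
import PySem

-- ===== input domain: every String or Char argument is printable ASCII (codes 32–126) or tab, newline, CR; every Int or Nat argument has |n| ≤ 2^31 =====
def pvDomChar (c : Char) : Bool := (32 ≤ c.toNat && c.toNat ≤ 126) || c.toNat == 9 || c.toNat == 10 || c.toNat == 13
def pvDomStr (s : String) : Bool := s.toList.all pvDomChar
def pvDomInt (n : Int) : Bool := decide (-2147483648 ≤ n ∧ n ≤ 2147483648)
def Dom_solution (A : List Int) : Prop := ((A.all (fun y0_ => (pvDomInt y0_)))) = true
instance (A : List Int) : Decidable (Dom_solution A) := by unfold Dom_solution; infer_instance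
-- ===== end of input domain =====

-- B replaces A's single merged ±1-tagged event list by two separately sorted
-- start/end arrays walked with an end-pointer and an open-circle counter
-- (objective: alternative decomposition, same O(n log n) cost).

-- ===== PORT A =====
-- the 'for i in range(len(E))' sweep with running sum1/sum2 and early 'return -1'
def pvGoA : List (Int × Int) → Int → Int → Int
  | [], _, sum2 => sum2
  | (_, t) :: rest, sum1, sum2 =>
    let sum1' := sum1 + t
    if t = 1 then
      let sum2' := sum2 + sum1' - 1
      if sum2' > 10000000 then -1 else pvGoA rest sum1' sum2'
    else pvGoA rest sum1' sum2

def solution (A : List Int) : Int :=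
  let N := A.length
  if N = 0 then 0
  else if ¬ (N ≥ 0 ∧ N ≤ 100000) then 0
  else if ¬ ((PySem.List.min? A (fun x => x)).getD 0 ≥ 0 ∧
             (PySem.List.max? A (fun x => x)).getD 0 ≤ 2147483647) then 0
  else if A.any (fun a => decide (a < 0)) then 0  -- the 'for a in A: if a < 0: return 0' loop
  else
    -- i in range(N) is always a valid index, so A[i] is getD with an unused default
    let B := (List.range N).map (fun i => ((Int.ofNat i) - A.getD i 0, (1 : Int)))
    let C := (List.range N).map (fun i => ((Int.ofNat i) + A.getD i 0, (-1 : Int)))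
    let D := B ++ C
    let E := PySem.List.sorted D (fun x => x.1) false
    pvGoA E 0 0

-- ===== PORT B =====
-- the inner 'while j < N and ends[j] < s' loop (N = ends.length)
def pvAdv (ends : List Int) (j : Nat) (opened : Int) (s : Int) : Nat × Int :=
  -- the index is guarded by 'j < ends.length', so getD's default is never used
  if j < ends.length ∧ ends.getD j 0 < s then pvAdv ends (j + 1) (opened - 1) s
  else (j, opened)
termination_by ends.length - j
decreasing_by omega

-- the 'for s in starts' loop with early 'return -1'
def pvGoB (ends : List Int) : List Int → Nat → Int → Int → Int
  | [], _, _, total => total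
  | s :: rest, j, opened, total =>
    let p := pvAdv ends j opened s
    let total' := total + p.2
    if total' > 10000000 then -1 else pvGoB ends rest p.1 (p.2 + 1) total'

def solution_alt (A : List Int) : Int :=
  let N := A.length
  if N = 0 then 0
  else if ¬ (N ≥ 0 ∧ N ≤ 100000) then 0
  else if ¬ ((PySem.List.min? A (fun x => x)).getD 0 ≥ 0 ∧
             (PySem.List.max? A (fun x => x)).getD 0 ≤ 2147483647) then 0
  else if A.any (fun a => decide (a < 0)) then 0
  else
    let starts := PySem.List.sorted ((List.range N).map (fun i => (Int.ofNat i) - A.getD i 0)) (fun x => x) false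
    let ends := PySem.List.sorted ((List.range N).map (fun i => (Int.ofNat i) + A.getD i 0)) (fun x => x) false
    pvGoB ends starts 0 0 0

-- ===== PRECONDITION & SPEC =====
def Spec_solution (A : List Int) (out : Int) : Prop := out = solution_alt A
instance (A : List Int) (out : Int) : Decidable (Spec_solution A out) := by unfold Spec_solution; infer_instance

-- ===== CLAIM (what is proved, stated in full; the proofs are below) =====
def Claim_equal_solution : Prop := ∀ (A : List Int), Dom_solution A → Spec_solution A (solution A)

-- ===== LEMMAS AND PROOFS =====

-- number of elements of l strictly below s
def pvCntLT (l : List Int) (s : Int) : Nat := (l.filter (fun e => decide (e < s))).length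

-- values of the start / end events of a tagged event list
def pvStartsV (l : List (Int × Int)) : List Int := (l.filter (fun x => decide (x.2 = 1))).map Prod.fst
def pvEndsV (l : List (Int × Int)) : List Int := (l.filter (fun x => ! decide (x.2 = 1))).map Prod.fst

-- the contribution of the k-th start s is k - #(ends < s)
def pvContribs (ends : List Int) : List Int → Nat → List Int
  | [], _ => []
  | s :: rest, k => ((k : Int) - (pvCntLT ends s : Int)) :: pvContribs ends rest (k + 1)

-- reference fold: add the contributions in order, -1 as soon as the sum exceeds 10^7
def pvGoR : List Int → Int → Int
  | [], t => t
  | c :: rest, t => let t' := t + c; if t' > 10000000 then -1 else pvGoR rest t'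

-- in an equal-key block, no end event precedes a start event (stability of A's sort)
def pvP2 (x y : Int × Int) : Prop := x.1 = y.1 → y.2 = 1 → x.2 = 1

theorem pvInsert_pairwise (e : Int × Int) (acc : List (Int × Int))
    (hs : acc.Pairwise (fun a b => a.1 ≤ b.1)) (hp : acc.Pairwise pvP2) (he : e.2 ≠ 1) :
    (PySem.List.insertBy (fun a b => decide (a.1 < b.1)) e acc).Pairwise (fun a b => a.1 ≤ b.1) ∧
    (PySem.List.insertBy (fun a b => decide (a.1 < b.1)) e acc).Pairwise pvP2 := by
  induction acc with
  | nil =>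
    constructor <;> · rw [PySem.List.insertBy]; exact List.pairwise_singleton _ _
  | cons y ys ih =>
    rw [List.pairwise_cons] at hs hp
    obtain ⟨hyle, hs'⟩ := hs
    obtain ⟨hyp2, hp'⟩ := hp
    obtain ⟨ih1, ih2⟩ := ih hs' hp'
    rw [PySem.List.insertBy]
    by_cases hlt : e.1 < y.1
    · simp only [hlt, decide_true, if_true]
      constructor
      · refine List.pairwise_cons.mpr ⟨?_, List.pairwise_cons.mpr ⟨hyle, hs'⟩⟩
        intro z hz
        rcases List.mem_cons.mp hz with rfl | hz'
        · exact le_of_lt hlt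
        · exact le_of_lt (lt_of_lt_of_le hlt (hyle z hz'))
      · refine List.pairwise_cons.mpr ⟨?_, List.pairwise_cons.mpr ⟨hyp2, hp'⟩⟩
        intro z hz heq
        exfalso
        rcases List.mem_cons.mp hz with rfl | hz'
        · exact absurd heq (ne_of_lt hlt)
        · exact absurd heq (ne_of_lt (lt_of_lt_of_le hlt (hyle z hz')))
    · simp only [hlt, decide_false]
      constructor
      · refine List.pairwise_cons.mpr ⟨?_, ih1⟩
        intro z hz
        rcases (PySem.List.mem_insertBy _ _ _ _).mp hz with rfl | hz'
        · exact le_of_not_gt hlt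
        · exact hyle z hz'
      · refine List.pairwise_cons.mpr ⟨?_, ih2⟩
        intro z hz
        rcases (PySem.List.mem_insertBy _ _ _ _).mp hz with rfl | hz'
        · exact fun _ h1 => absurd h1 he
        · exact hyp2 z hz'

theorem pvFoldl_P2 (cl : List (Int × Int)) :
    ∀ acc, (∀ x ∈ cl, x.2 = -1) → acc.Pairwise (fun a b => a.1 ≤ b.1) → acc.Pairwise pvP2 →
    (cl.foldl (fun acc x => PySem.List.insertBy (fun a b => decide (a.1 < b.1)) x acc) acc).Pairwise pvP2 := by
  induction cl with
  | nil => intro acc _ _ hp; exact hp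
  | cons c cl ih =>
    intro acc hall hle hp
    have hc : c.2 = -1 := hall c (List.mem_cons_self ..)
    have hne : c.2 ≠ 1 := by rw [hc]; decide
    obtain ⟨h1, h2⟩ := pvInsert_pairwise c acc hle hp hne
    exact ih _ (fun x hx => hall x (List.mem_cons_of_mem _ hx)) h1 h2

theorem pvGoA_eq (suf : List (Int × Int)) :
    ∀ (pre : List (Int × Int)) (t : Int),
    ((pre ++ suf).Pairwise (fun a b => a.1 ≤ b.1)) → ((pre ++ suf).Pairwise pvP2) →
    (∀ x ∈ pre ++ suf, x.2 = 1 ∨ x.2 = -1) →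
    pvGoA suf (((pvStartsV pre).length : Int) - ((pvEndsV pre).length : Int)) t
      = pvGoR (pvContribs (pvEndsV (pre ++ suf)) (pvStartsV suf) (pvStartsV pre).length) t := by
  induction suf with
  | nil => intro pre t _ _ _; rfl
  | cons hd rest ih =>
    intro pre t hle hp2 hall
    obtain ⟨v, tg⟩ := hd
    have hassoc : pre ++ (v, tg) :: rest = (pre ++ [(v, tg)]) ++ rest := by simp
    obtain ⟨hle_pre, hle_suf, hle_cross⟩ := List.pairwise_append.mp hle
    obtain ⟨hp2_pre, hp2_suf, hp2_cross⟩ := List.pairwise_append.mp hp2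
    by_cases htg : tg = 1
    · subst htg
      -- every end recorded in pre lies strictly below v, no end in rest does
      have hpre_lt : ∀ x ∈ pvEndsV pre, x < v := by
        intro x hx
        obtain ⟨p, hpmem, rfl⟩ := List.mem_map.mp hx
        obtain ⟨hp_pre, hq⟩ := List.mem_filter.mp hpmem
        have hq' : p.2 ≠ 1 := by simpa using hq
        have h1 : p.1 ≤ v := hle_cross p hp_pre (v, 1) (List.mem_cons_self ..)
        have h2 := hp2_cross p hp_pre (v, 1) (List.mem_cons_self ..)
        rcases lt_or_eq_of_le h1 with h | h
        · exact h
        · exact absurd (h2 h rfl) hq'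
      have hrest_ge : ∀ x ∈ pvEndsV rest, ¬ x < v := by
        intro x hx
        obtain ⟨p, hpmem, rfl⟩ := List.mem_map.mp hx
        obtain ⟨hp_rest, _⟩ := List.mem_filter.mp hpmem
        have := (List.pairwise_cons.mp hle_suf).1 p hp_rest
        omega
      have hkey : pvCntLT (pvEndsV (pre ++ (v, 1) :: rest)) v = (pvEndsV pre).length := by
        unfold pvCntLT
        have hEsplit : pvEndsV (pre ++ (v, 1) :: rest) = pvEndsV pre ++ pvEndsV rest := by
          simp [pvEndsV, List.filter_append]
        rw [hEsplit, List.filter_append,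
          List.filter_eq_self.mpr (fun x hx => by simpa using hpre_lt x hx),
          List.filter_eq_nil_iff.mpr (fun x hx => by simpa using hrest_ge x hx),
          List.append_nil]
      have hsv : pvStartsV ((v, 1) :: rest) = v :: pvStartsV rest := by
        simp [pvStartsV]
      rw [hsv, pvGoA, pvContribs, pvGoR]
      have heq : t + (((pvStartsV pre).length : Int) - ((pvEndsV pre).length : Int) + 1) - 1
          = t + (((pvStartsV pre).length : Int)
              - (pvCntLT (pvEndsV (pre ++ (v, 1) :: rest)) v : Int)) := by
        rw [hkey]; ring
      rw [heq]
      by_cases hbig : t + (((pvStartsV pre).length : Int)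
          - (pvCntLT (pvEndsV (pre ++ (v, 1) :: rest)) v : Int)) > 10000000
      · simp only [hbig, if_true]
      · simp only [hbig, if_false]
        have hsp' : pvStartsV (pre ++ [(v, 1)]) = pvStartsV pre ++ [v] := by
          simp [pvStartsV, List.filter_append]
        have hep' : pvEndsV (pre ++ [(v, 1)]) = pvEndsV pre := by
          simp [pvEndsV, List.filter_append]
        have haux := ih (pre ++ [(v, 1)])
          (t + (((pvStartsV pre).length : Int)
            - (pvCntLT (pvEndsV (pre ++ (v, 1) :: rest)) v : Int)))
          (by rw [← hassoc]; exact hle) (by rw [← hassoc]; exact hp2)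
          (by rw [← hassoc]; exact hall)
        rw [hsp', hep', ← hassoc] at haux
        have hcast : ((pvStartsV pre ++ [v]).length : Int) - ((pvEndsV pre).length : Int)
            = ((pvStartsV pre).length : Int) - ((pvEndsV pre).length : Int) + 1 := by
          simp; ring
        have hlen : (pvStartsV pre ++ [v]).length = (pvStartsV pre).length + 1 := by simp
        rw [hcast, hlen] at haux
        exact haux
    · have htg' : tg = -1 := by
        rcases hall (v, tg) (by simp) with h | h
        · exact absurd h htg
        · exact h
      subst htg'
      have hsv : pvStartsV ((v, -1) :: rest) = pvStartsV rest := by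
        simp [pvStartsV]
      rw [hsv, pvGoA]
      simp only [if_neg (by decide : ¬ (-1 : Int) = 1)]
      have hsp' : pvStartsV (pre ++ [(v, -1)]) = pvStartsV pre := by
        simp [pvStartsV, List.filter_append]
      have hep' : pvEndsV (pre ++ [(v, -1)]) = pvEndsV pre ++ [v] := by
        simp [pvEndsV, List.filter_append]
      have haux := ih (pre ++ [(v, -1)]) t
        (by rw [← hassoc]; exact hle) (by rw [← hassoc]; exact hp2)
        (by rw [← hassoc]; exact hall)
      rw [hsp', hep', ← hassoc] at haux
      have hcast : ((pvStartsV pre).length : Int) - ((pvEndsV pre ++ [v]).length : Int)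
          = ((pvStartsV pre).length : Int) - ((pvEndsV pre).length : Int) + -1 := by
        simp; ring
      rw [hcast] at haux
      exact haux

-- on a sorted list the elements below s form a prefix of length pvCntLT
theorem pvFilter_take_drop (es : List Int) (p : Int → Bool) (j : Nat) :
    es.filter p = (es.take j).filter p ++ (es.drop j).filter p := by
  rw [← List.filter_append, List.take_append_drop]

theorem pvFilter_drop_nil (es : List Int) (hs : es.Pairwise (fun a b => a ≤ b)) (s : Int)
    (j : Nat) (hj : j < es.length) (hge : ¬ es[j] < s) :
    (es.drop j).filter (fun e => decide (e < s)) = [] := by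
  rw [List.filter_eq_nil_iff]
  intro x hx
  obtain ⟨n, hn, hxe⟩ := List.mem_iff_getElem.mp hx
  rw [List.length_drop] at hn
  have hn' : j + n < es.length := by omega
  have hxe' : x = es[j + n] := by rw [← hxe, List.getElem_drop]
  have hle : es[j] ≤ es[j + n] := by
    rcases Nat.eq_zero_or_pos n with rfl | hpos
    · simp
    · exact (List.pairwise_iff_getElem.mp hs) j (j + n) hj hn' (by omega)
  subst hxe'
  simp only [decide_eq_true_eq]
  omega

theorem pvCnt_lt_of_lt (es : List Int) (hs : es.Pairwise (fun a b => a ≤ b)) (s : Int)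
    (i : Nat) (hi : i < es.length) (h : i < pvCntLT es s) : es[i] < s := by
  by_contra hns
  have hsplit := pvFilter_take_drop es (fun e => decide (e < s)) i
  rw [pvFilter_drop_nil es hs s i hi hns, List.append_nil] at hsplit
  have : pvCntLT es s ≤ i := by
    unfold pvCntLT
    rw [hsplit]
    calc ((es.take i).filter _).length ≤ (es.take i).length := List.length_filter_le _ _
      _ ≤ i := by simp [List.length_take]
  omega

theorem pvAdv_spec (es : List Int) (hs : es.Pairwise (fun a b => a ≤ b)) (s : Int) :
    ∀ j opened, j ≤ es.length → (∀ i, (h : i < es.length) → i < j → es[i] < s) →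
    pvAdv es j opened s = (pvCntLT es s, opened - ((pvCntLT es s : Int) - (j : Int))) := by
  have H : ∀ n j opened, es.length - j = n → j ≤ es.length →
      (∀ i, (h : i < es.length) → i < j → es[i] < s) →
      pvAdv es j opened s = (pvCntLT es s, opened - ((pvCntLT es s : Int) - (j : Int))) := by
    intro n
    induction n with
    | zero =>
      intro j opened hn hj hpre
      have hjlen : j = es.length := by omega
      subst hjlen
      have hcnt : pvCntLT es s = es.length := by
        unfold pvCntLT
        rw [List.filter_eq_self.mpr]
        intro x hx
        obtain ⟨m, hm, hxe⟩ := List.mem_iff_getElem.mp hx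
        subst hxe
        simp only [decide_eq_true_eq]
        exact hpre m hm hm
      rw [pvAdv, if_neg (by simp), hcnt]
      simp
    | succ m ih =>
      intro j opened hn hj hpre
      rw [pvAdv]
      by_cases hcond : j < es.length ∧ es.getD j 0 < s
      · obtain ⟨hjl, hlt⟩ := hcond
        rw [List.getD_eq_getElem es 0 hjl] at hlt
        rw [if_pos ⟨hjl, by rwa [List.getD_eq_getElem es 0 hjl]⟩]
        have hpre' : ∀ i, (h : i < es.length) → i < j + 1 → es[i] < s := by
          intro i hi hij
          rcases Nat.lt_succ_iff_lt_or_eq.mp hij with h' | rfl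
          · exact hpre i hi h'
          · exact hlt
        rw [ih (j + 1) (opened - 1) (by omega) (by omega) hpre']
        refine Prod.ext rfl ?_
        push_cast
        ring
      · rw [if_neg hcond]
        have hcnt : pvCntLT es s = j := by
          unfold pvCntLT
          rw [pvFilter_take_drop es _ j]
          have htake : (es.take j).filter (fun e => decide (e < s)) = es.take j := by
            rw [List.filter_eq_self]
            intro x hx
            obtain ⟨m', hm', hxe⟩ := List.mem_iff_getElem.mp hx
            rw [List.getElem_take] at hxe
            subst hxe
            simp only [decide_eq_true_eq]
            exact hpre m' (by simp at hm'; omega) (by simp at hm'; omega)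
          have hdrop : (es.drop j).filter (fun e => decide (e < s)) = [] := by
            rcases Nat.lt_or_ge j es.length with hjl | hjl
            · refine pvFilter_drop_nil es hs s j hjl ?_
              rw [← List.getD_eq_getElem es 0 hjl]
              intro hx
              exact hcond ⟨hjl, hx⟩
            · rw [List.drop_eq_nil_of_le hjl, List.filter_nil]
          rw [htake, hdrop, List.append_nil, List.length_take]
          omega
        rw [hcnt]
        simp
  exact fun j opened hj hpre => H (es.length - j) j opened rfl hj hpre

theorem pvGoB_eq (ss : List Int) :
    ∀ (es : List Int) (j : Nat) (t : Int) (k : Nat), ss.Pairwise (fun a b => a ≤ b) →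
    es.Pairwise (fun a b => a ≤ b) → j ≤ es.length →
    (∀ i, (h : i < es.length) → i < j → ∀ s ∈ ss, es[i] < s) →
    pvGoB es ss j ((k : Int) - (j : Int)) t = pvGoR (pvContribs es ss k) t := by
  induction ss with
  | nil => intro es j t k _ _ _ _; rfl
  | cons s rest ih =>
    intro es j t k hss hes hj hpre
    rw [List.pairwise_cons] at hss
    obtain ⟨hs_le, hss'⟩ := hss
    have hadv := pvAdv_spec es hes s j ((k : Int) - (j : Int)) hj
      (fun i hi hij => hpre i hi hij s (List.mem_cons_self ..))
    have hcle : pvCntLT es s ≤ es.length := by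
      unfold pvCntLT; exact (List.length_filter_le _ _)
    show (let p := pvAdv es j ((k : Int) - (j : Int)) s
          let total' := t + p.2
          if total' > 10000000 then -1 else pvGoB es rest p.1 (p.2 + 1) total')
        = pvGoR (pvContribs es (s :: rest) k) t
    rw [hadv]
    show (if t + ((k : Int) - (j : Int) - ((pvCntLT es s : Int) - (j : Int))) > 10000000 then -1
          else pvGoB es rest (pvCntLT es s)
            (((k : Int) - (j : Int) - ((pvCntLT es s : Int) - (j : Int))) + 1)
            (t + ((k : Int) - (j : Int) - ((pvCntLT es s : Int) - (j : Int)))))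
        = pvGoR (pvContribs es (s :: rest) k) t
    have harith : (k : Int) - (j : Int) - ((pvCntLT es s : Int) - (j : Int))
        = (k : Int) - (pvCntLT es s : Int) := by ring
    rw [harith]
    show _ = (let t' := t + ((k : Int) - (pvCntLT es s : Int));
              if t' > 10000000 then -1 else pvGoR (pvContribs es rest (k + 1)) t')
    by_cases hbig : t + ((k : Int) - (pvCntLT es s : Int)) > 10000000
    · simp only [hbig, if_true]
    · simp only [hbig, if_false]
      have hk1 : (k : Int) - (pvCntLT es s : Int) + 1
          = ((k + 1 : Nat) : Int) - ((pvCntLT es s : Nat) : Int) := by push_cast; ring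
      rw [hk1]
      refine ih es (pvCntLT es s) _ (k + 1) hss' hes hcle ?_
      intro i hi hic s2 hs2
      exact lt_of_lt_of_le (pvCnt_lt_of_lt es hes s i hi hic) (hs_le s2 hs2)

theorem pvContribs_congr (e1 e2 : List Int) (h : ∀ s, pvCntLT e1 s = pvCntLT e2 s) :
    ∀ ss k, pvContribs e1 ss k = pvContribs e2 ss k := by
  intro ss
  induction ss with
  | nil => intro k; rfl
  | cons s rest ih => intro k; simp [pvContribs, h s, ih]

theorem pvCntLT_perm (e1 e2 : List Int) (h : e1.Perm e2) (s : Int) :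
    pvCntLT e1 s = pvCntLT e2 s :=
  (h.filter _).length_eq

theorem pvPairwise_of_tag1 (l : List (Int × Int)) (h : ∀ y ∈ l, y.2 = 1) :
    l.Pairwise pvP2 := by
  induction l with
  | nil => exact List.Pairwise.nil
  | cons y ys ih =>
    refine List.pairwise_cons.mpr ⟨?_, ih fun z hz => h z (List.mem_cons_of_mem _ hz)⟩
    intro z _ _ _
    exact h y (List.mem_cons_self ..)

theorem pvMain (A : List Int) :
    pvGoA (PySem.List.sorted
        ((List.range A.length).map (fun i => ((Int.ofNat i) - A.getD i 0, (1 : Int)))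
          ++ (List.range A.length).map (fun i => ((Int.ofNat i) + A.getD i 0, (-1 : Int))))
        (fun x => x.1) false) 0 0
    = pvGoB (PySem.List.sorted ((List.range A.length).map (fun i => (Int.ofNat i) + A.getD i 0)) (fun x => x) false)
        (PySem.List.sorted ((List.range A.length).map (fun i => (Int.ofNat i) - A.getD i 0)) (fun x => x) false)
        0 0 0 := by
  set Bl := (List.range A.length).map (fun i => ((Int.ofNat i) - A.getD i 0, (1 : Int))) with hBl
  set Cl := (List.range A.length).map (fun i => ((Int.ofNat i) + A.getD i 0, (-1 : Int))) with hCl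
  set startsPy := (List.range A.length).map (fun i => (Int.ofNat i) - A.getD i 0) with hstartsPy
  set endsPy := (List.range A.length).map (fun i => (Int.ofNat i) + A.getD i 0) with hendsPy
  set E := PySem.List.sorted (Bl ++ Cl) (fun x => x.1) false with hE
  set ss := PySem.List.sorted startsPy (fun x => x) false with hss
  set es := PySem.List.sorted endsPy (fun x => x) false with hes
  have hBtag : ∀ x ∈ Bl, x.2 = 1 := by
    intro x hx; obtain ⟨i, _, rfl⟩ := List.mem_map.mp hx; rfl
  have hCtag : ∀ x ∈ Cl, x.2 = -1 := by
    intro x hx; obtain ⟨i, _, rfl⟩ := List.mem_map.mp hx; rfl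
  have hEperm : E.Perm (Bl ++ Cl) := PySem.List.sorted_perm _ _ _
  have hEle : E.Pairwise (fun a b => a.1 ≤ b.1) := PySem.List.sorted_pairwise _ _
  have hP2 : E.Pairwise pvP2 := by
    have h1 : E = Cl.foldl (fun acc x => PySem.List.insertBy (fun a b => decide (a.1 < b.1)) x acc)
        (PySem.List.sorted Bl (fun x => x.1) false) := by
      rw [hE, PySem.List.sorted_eq_foldl_insertBy, List.foldl_append,
        ← PySem.List.sorted_eq_foldl_insertBy]
    rw [h1]
    refine pvFoldl_P2 Cl _ hCtag (PySem.List.sorted_pairwise _ _) ?_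
    refine pvPairwise_of_tag1 _ ?_
    intro y hy
    exact hBtag y ((PySem.List.sorted_perm Bl _ false).subset hy)
  have htags : ∀ x ∈ E, x.2 = 1 ∨ x.2 = -1 := by
    intro x hx
    rcases List.mem_append.mp (hEperm.subset hx) with h | h
    · exact Or.inl (hBtag _ h)
    · exact Or.inr (hCtag _ h)
  have hA : pvGoA E 0 0 = pvGoR (pvContribs (pvEndsV E) (pvStartsV E) 0) 0 := by
    have h := pvGoA_eq E [] 0 (by simpa using hEle) (by simpa using hP2) (by simpa using htags)
    simpa using h
  have hss_pw : ss.Pairwise (fun a b => a ≤ b) := PySem.List.sorted_pairwise _ _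
  have hes_pw : es.Pairwise (fun a b => a ≤ b) := PySem.List.sorted_pairwise _ _
  have hB : pvGoB es ss 0 0 0 = pvGoR (pvContribs es ss 0) 0 := by
    have h := pvGoB_eq ss es 0 0 0 hss_pw hes_pw (Nat.zero_le _)
      (fun i hi hij => absurd hij (Nat.not_lt_zero i))
    simpa using h
  have hfB : (Bl ++ Cl).filter (fun x => decide (x.2 = 1)) = Bl := by
    rw [List.filter_append, List.filter_eq_self.mpr (fun x hx => by simp [hBtag x hx]),
      List.filter_eq_nil_iff.mpr (fun x hx => by simp [hCtag x hx]), List.append_nil]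
  have hfC : (Bl ++ Cl).filter (fun x => ! decide (x.2 = 1)) = Cl := by
    rw [List.filter_append, List.filter_eq_nil_iff.mpr (fun x hx => by simp [hBtag x hx]),
      List.filter_eq_self.mpr (fun x hx => by simp [hCtag x hx]), List.nil_append]
  have hmapB : Bl.map Prod.fst = startsPy := by
    rw [hBl, hstartsPy, List.map_map]; rfl
  have hmapC : Cl.map Prod.fst = endsPy := by
    rw [hCl, hendsPy, List.map_map]; rfl
  have hsperm : (pvStartsV E).Perm startsPy := by
    have h := (hEperm.filter (fun x => decide (x.2 = 1))).map Prod.fst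
    rw [hfB, hmapB] at h
    exact h
  have hspw : (pvStartsV E).Pairwise (fun a b => a ≤ b) := by
    exact List.pairwise_map.mpr (hEle.filter _)
  have hss_eq : ss = pvStartsV E :=
    PySem.List.sorted_id_eq_of_perm_of_pairwise startsPy (pvStartsV E) hsperm hspw
  have heperm : (pvEndsV E).Perm es := by
    have h := (hEperm.filter (fun x => ! decide (x.2 = 1))).map Prod.fst
    rw [hfC, hmapC] at h
    exact h.trans (PySem.List.sorted_perm endsPy _ false).symm
  rw [hA, hB, hss_eq, pvContribs_congr (pvEndsV E) es (pvCntLT_perm _ _ heperm) (pvStartsV E) 0]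

-- ===== VERDICT (by name: the statement is the Claim_ definition above) =====
theorem solution_spec : Claim_equal_solution := by
  unfold Claim_equal_solution Spec_solution
  intro A _
  unfold solution solution_alt
  simp only
  split_ifs <;> first
  | rfl
  | exact pvMain A
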